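-- pv_equiv track=rewrite | github.com/ic3top/KPI-labs | Python-Gui-Labs/Sem_2/Lab_1/modules/fullSolution.py | fullSolution
-- ===== SOURCE A (Python) =====
-- def fullSolution(U, A, B, C):
--     U = list(U)
--     A = list(A)
--     B = list(B)
--     C = list(C)
--     notA = []
--     Z = []
--     result = []
--     for i in U:
--         if i not in A:
--             notA.append(i)
--     for j in notA:
--         if j in B:
--             Z.append(j)
--     for j in A:
--         if j not in Z:
--             Z.append(j)
--     for j in Z:
--         if j not in C:
--             result.append(j)
--     result.sort()
--     return set(result)
-- ===== SOURCE B (Python) =====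
-- def fullSolution(U, A, B, C):
--     # Algebraically, ((U \ A) & B) | A == A | (U & B), so the whole job is a
--     # single filter of U + A with one derived keep-predicate; no intermediate
--     # stage lists are ever built.
--     sA, sB, sC = set(A), set(B), set(C)
--     return set(sorted(x for x in U + A if (x in sA or x in sB) and x not in sC))
-- ===== Notes on version B (the rewrite author's own statement) =====
-- stated objective: simpler
-- what changed: Derives the identity ((U\A)∩B)∪A = A∪(U∩B) and replaces A's four staged list-building loops (notA, Z0, Z, result, each scanning lists) with ONE filter pass over U+A using a single combined predicate against three hash sets built once; no intermediate stage lists exist.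
import Mathlib
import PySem

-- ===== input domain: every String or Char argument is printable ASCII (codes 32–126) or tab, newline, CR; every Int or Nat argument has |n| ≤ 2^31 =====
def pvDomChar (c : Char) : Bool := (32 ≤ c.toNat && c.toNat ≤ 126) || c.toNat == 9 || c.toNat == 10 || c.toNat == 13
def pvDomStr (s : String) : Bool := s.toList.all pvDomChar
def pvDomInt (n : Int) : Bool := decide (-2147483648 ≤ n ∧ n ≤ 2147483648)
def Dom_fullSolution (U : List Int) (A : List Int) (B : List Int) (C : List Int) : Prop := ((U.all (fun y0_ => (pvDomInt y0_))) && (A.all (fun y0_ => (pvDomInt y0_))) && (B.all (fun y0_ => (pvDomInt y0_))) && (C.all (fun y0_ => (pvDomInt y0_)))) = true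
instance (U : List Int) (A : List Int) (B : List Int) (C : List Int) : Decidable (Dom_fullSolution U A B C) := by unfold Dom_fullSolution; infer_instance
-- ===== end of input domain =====

-- B uses the identity ((U\A)∩B)∪A = A∪(U∩B) to replace A's four staged building
-- loops with one filter pass over U+A under a single predicate (objective: simpler).

-- ===== PORT A =====
def fullSolution (U : List Int) (A : List Int) (B : List Int) (C : List Int) : List Int :=
  -- for i in U: if i not in A: notA.append(i)
  let notA : List Int := U.foldl (fun acc i => if i ∈ A then acc else acc ++ [i]) []
  -- for j in notA: if j in B: Z.append(j)
  let Z0 : List Int := notA.foldl (fun acc j => if j ∈ B then acc ++ [j] else acc) []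
  -- for j in A: if j not in Z: Z.append(j)
  let Z : List Int := A.foldl (fun acc j => if j ∈ acc then acc else acc ++ [j]) Z0
  -- for j in Z: if j not in C: result.append(j)
  let result : List Int := Z.foldl (fun acc j => if j ∈ C then acc else acc ++ [j]) []
  -- result.sort(); return set(result)
  PySem.Set.ofList (PySem.List.sorted result (fun x => x) false)

-- ===== PORT B =====
def fullSolution_alt (U : List Int) (A : List Int) (B : List Int) (C : List Int) : List Int :=
  -- sA, sB, sC = set(A), set(B), set(C)
  let sA : PySem.Set Int := PySem.Set.ofList A
  let sB : PySem.Set Int := PySem.Set.ofList B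
  let sC : PySem.Set Int := PySem.Set.ofList C
  -- return set(sorted(x for x in U + A if (x in sA or x in sB) and x not in sC))
  PySem.Set.ofList (PySem.List.sorted
    ((U ++ A).filter (fun x => (decide (x ∈ sA) || decide (x ∈ sB)) && !decide (x ∈ sC)))
    (fun x => x) false)

-- ===== PRECONDITION & SPEC =====
def Spec_fullSolution (U : List Int) (A : List Int) (B : List Int) (C : List Int) (out : List Int) : Prop := out = fullSolution_alt U A B C
instance (U : List Int) (A : List Int) (B : List Int) (C : List Int) (out : List Int) : Decidable (Spec_fullSolution U A B C out) := by unfold Spec_fullSolution; infer_instance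

-- ===== CLAIM (what is proved, stated in full; the proofs are below) =====
def Claim_equal_fullSolution : Prop := ∀ (U : List Int) (A : List Int) (B : List Int) (C : List Int), Dom_fullSolution U A B C → Spec_fullSolution U A B C (fullSolution U A B C)

-- ===== LEMMAS AND PROOFS =====

-- membership through A's three loop shapes
theorem mem_foldl_app_if_not {A : List Int} :
    ∀ (xs acc : List Int) (x : Int),
      x ∈ xs.foldl (fun acc i => if i ∈ A then acc else acc ++ [i]) acc ↔
        x ∈ acc ∨ (x ∈ xs ∧ x ∉ A) := by
  intro xs
  induction xs with
  | nil => simp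
  | cons y ys ih =>
    intro acc x
    simp only [List.foldl_cons]
    by_cases hy : y ∈ A
    · simp [hy, ih]
      constructor
      · rintro (h | h) <;> tauto
      · rintro (h | ⟨(rfl | h), hx⟩) <;> tauto
    · simp [hy, ih, List.mem_append]
      constructor
      · rintro ((h | rfl) | h) <;> tauto
      · rintro (h | ⟨(rfl | h), hx⟩) <;> tauto

theorem mem_foldl_app_if {B : List Int} :
    ∀ (xs acc : List Int) (x : Int),
      x ∈ xs.foldl (fun acc j => if j ∈ B then acc ++ [j] else acc) acc ↔
        x ∈ acc ∨ (x ∈ xs ∧ x ∈ B) := by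
  intro xs
  induction xs with
  | nil => simp
  | cons y ys ih =>
    intro acc x
    simp only [List.foldl_cons]
    by_cases hy : y ∈ B
    · simp [hy, ih, List.mem_append]
      constructor
      · rintro ((h | rfl) | h) <;> tauto
      · rintro (h | ⟨(rfl | h), hx⟩) <;> tauto
    · simp [hy, ih]
      constructor
      · rintro (h | h) <;> tauto
      · rintro (h | ⟨(rfl | h), hx⟩) <;> tauto

theorem mem_foldl_dedup :
    ∀ (xs acc : List Int) (x : Int),
      x ∈ xs.foldl (fun acc j => if j ∈ acc then acc else acc ++ [j]) acc ↔
        x ∈ acc ∨ x ∈ xs := by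
  intro xs
  induction xs with
  | nil => simp
  | cons y ys ih =>
    intro acc x
    simp only [List.foldl_cons]
    by_cases hy : y ∈ acc
    · simp [hy, ih]
      constructor
      · rintro (h | h) <;> tauto
      · rintro (h | rfl | h) <;> tauto
    · simp [hy, ih, List.mem_append]
      constructor
      · rintro ((h | rfl) | h) <;> tauto
      · rintro (h | rfl | h) <;> tauto

-- PySem.Set.ofList preserves a ≤-chain
theorem pairwise_ofList_le :
    ∀ (l : List Int), l.Pairwise (· ≤ ·) → (PySem.Set.ofList l).Pairwise (· ≤ ·) := by
  intro l
  induction l with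
  | nil => simp [PySem.Set.ofList]
  | cons y ys ih =>
    intro h
    rw [PySem.Set.ofList_cons]
    rcases List.pairwise_cons.mp h with ⟨hy, hys⟩
    refine List.pairwise_cons.mpr ⟨?_, ?_⟩
    · intro a ha
      rcases (PySem.Set.mem_discard _ _ _).mp ha with ⟨ha', _⟩
      exact hy a ((PySem.Set.mem_ofList _ _).mp ha')
    · have : (PySem.Set.ofList ys).Pairwise (· ≤ ·) := ih hys
      simpa [PySem.Set.discard] using this.filter _

-- canonical form: set(sorted(l)) is determined by l's membership alone
theorem ofList_sorted_eq_sorted_ofList (l : List Int) :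
    PySem.Set.ofList (PySem.List.sorted l (fun x => x) false) =
      PySem.List.sorted (PySem.Set.ofList l) (fun x => x) false := by
  have hperm : (PySem.Set.ofList (PySem.List.sorted l (fun x => x) false)).Perm (PySem.Set.ofList l) := by
    rw [List.perm_ext_iff_of_nodup (PySem.Set.nodup_ofList _) (PySem.Set.nodup_ofList _)]
    intro a
    simp [PySem.Set.mem_ofList, PySem.List.mem_sorted]
  have hpw : (PySem.Set.ofList (PySem.List.sorted l (fun x => x) false)).Pairwise (· ≤ ·) :=
    pairwise_ofList_le _ (PySem.List.sorted_pairwise l (fun x => x))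
  exact (PySem.List.sorted_id_eq_of_perm_of_pairwise _ _ hperm hpw).symm

theorem canon_eq_of_mem_iff (l1 l2 : List Int) (h : ∀ x, x ∈ l1 ↔ x ∈ l2) :
    PySem.Set.ofList (PySem.List.sorted l1 (fun x => x) false) =
      PySem.Set.ofList (PySem.List.sorted l2 (fun x => x) false) := by
  rw [ofList_sorted_eq_sorted_ofList, ofList_sorted_eq_sorted_ofList]
  apply PySem.List.sorted_id_eq_of_perm_of_pairwise
  · have hn : (PySem.List.sorted (PySem.Set.ofList l2) (fun x => x) false).Nodup :=
      (PySem.List.sorted_perm _ _ _).nodup_iff.mpr (PySem.Set.nodup_ofList _)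
    rw [List.perm_ext_iff_of_nodup hn (PySem.Set.nodup_ofList _)]
    intro a
    simp [PySem.List.mem_sorted, PySem.Set.mem_ofList, h a]
  · exact PySem.List.sorted_pairwise _ _

-- ===== VERDICT (by name: the statement is the Claim_ definition above) =====
theorem fullSolution_spec : Claim_equal_fullSolution := by
  intro U A B C _
  unfold Spec_fullSolution fullSolution fullSolution_alt
  apply canon_eq_of_mem_iff
  intro x
  rw [mem_foldl_app_if_not, mem_foldl_dedup, mem_foldl_app_if, mem_foldl_app_if_not]
  simp only [List.not_mem_nil, false_or, List.mem_filter, List.mem_append,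
    Bool.and_eq_true, Bool.or_eq_true, Bool.not_eq_true', decide_eq_true_eq,
    decide_eq_false_iff_not, PySem.Set.mem_ofList]
  tauto
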